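-- pv_equiv track=rewrite | github.com/yuu-eguci/problems | (2016-03-14)fizzbuzzもどき/プログラミング問題.py | strSort
-- ===== SOURCE A (Python) =====
-- def mySort(lis):
--     if len(lis) <= 1:
--         return lis
--     else:
--         base = lis[0]
--         biggerList  = []
--         smallerList = []
--         equalList   = []
--         for num in lis:
--             if   num > base: biggerList.append(num)
--             elif num < base: smallerList.append(num)
--             else           : equalList.append(num)
--         biggerList  = mySort(biggerList)
--         smallerList = mySort(smallerList)
--         return biggerList + equalList + smallerList
--
-- def strSort(lis):
--     # 文字列にする
--     lis = [str(x) for x in lis]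
--     # 桁数の最大をもとめる
--     maxNum = 0
--     for l in lis:
--         if maxNum < len(l):
--             maxNum = len(l)
--     # 桁数ごとに配列にする [[9], [98,99]]って感じになる
--     ketaNumList = []
--     for i in range(maxNum):
--         ketaNumList.append([])
--         for l in lis:
--             if len(l) == i + 1:
--                 ketaNumList[i].append(l)
--     # 二つ以上ある桁はソートする [[9], [99,98]]って感じになる
--     for i in range(len(ketaNumList)):
--         if len(ketaNumList[i]) >= 2:
--             ketaNumList[i] = mySort([int(x) for x in ketaNumList[i]])
--     # ketaNumListを、要素の並んでる順番に文字列化する "99998" って感じになる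
--     result = ""
--     for ketaNum in ketaNumList:
--         for num in ketaNum:
--             result += str(num)
--     return result
-- ===== SOURCE B (Python) =====
-- def strSort(lis):
--     # Single pass: bucket the decimal strings by length in a dict,
--     # then walk the present lengths in ascending order, sorting each
--     # bucket that needs it with the built-in sort (descending by value).
--     buckets = {}
--     for x in lis:
--         s = str(x)
--         buckets.setdefault(len(s), []).append(s)
--     out = []
--     for k in sorted(buckets):
--         group = buckets[k]
--         if len(group) > 1:
--             group = [str(n) for n in sorted(map(int, group), reverse=True)]
--         out.extend(group)
--     return "".join(out)
-- ===== Notes on version B (the rewrite author's own statement) =====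
-- stated objective: faster
-- what changed: A scans the whole list once per digit-length (range(maxNum) nested loop) and sorts each bucket with a hand-written quicksort (quadratic on adversarial buckets); B buckets all strings in a single dict pass and sorts each bucket with the built-in sort, walking the present lengths in ascending order.
import Mathlib
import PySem

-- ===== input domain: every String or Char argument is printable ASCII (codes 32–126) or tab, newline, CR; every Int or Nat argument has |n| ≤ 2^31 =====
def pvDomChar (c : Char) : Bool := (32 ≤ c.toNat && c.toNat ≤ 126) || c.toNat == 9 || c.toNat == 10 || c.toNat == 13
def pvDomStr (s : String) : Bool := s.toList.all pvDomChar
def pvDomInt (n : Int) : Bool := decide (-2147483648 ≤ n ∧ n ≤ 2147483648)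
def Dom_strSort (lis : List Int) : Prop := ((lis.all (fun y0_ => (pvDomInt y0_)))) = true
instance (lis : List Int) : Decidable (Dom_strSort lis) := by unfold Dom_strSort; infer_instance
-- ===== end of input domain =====

-- B replaces A's scan-per-digit-length plus hand-written quicksort by one dict-bucketing pass
-- and the built-in sort; equivalence of the two programs is proved below.

-- ===== PORT A =====
-- the partition loop of mySort: one pass over lis appending to bigger/smaller/equal
def pvPart (base : Int) : List Int → List Int × List Int × List Int
  | [] => ([], [], [])
  | n :: t =>
    let r := pvPart base t
    if base < n then (n :: r.1, r.2.1, r.2.2)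
    else if n < base then (r.1, n :: r.2.1, r.2.2)
    else (r.1, r.2.1, n :: r.2.2)

-- characterisation of the partition loop; pvMySort's termination proof cites it
theorem pvPart_eq (base : Int) (l : List Int) :
    pvPart base l = (l.filter (fun x => decide (base < x)),
                     l.filter (fun x => decide (x < base)),
                     l.filter (fun x => decide (¬ base < x ∧ ¬ x < base))) := by
  induction l with
  | nil => rfl
  | cons n t ih =>
    simp only [pvPart, ih, List.filter_cons]
    rcases lt_trichotomy base n with h | h | h
    · simp [h, not_lt_of_gt h]
    · simp [h]
    · simp [h, not_lt_of_gt h]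

theorem pvPart_fst_lt (l : List Int) (h : l ≠ []) :
    (pvPart l.headI l).1.length < l.length := by
  rw [pvPart_eq]
  obtain ⟨a, t, rfl⟩ := List.exists_cons_of_ne_nil h
  exact List.length_filter_lt_length_iff_exists.2 ⟨a, by simp, by simp⟩

theorem pvPart_snd_lt (l : List Int) (h : l ≠ []) :
    (pvPart l.headI l).2.1.length < l.length := by
  rw [pvPart_eq]
  obtain ⟨a, t, rfl⟩ := List.exists_cons_of_ne_nil h
  exact List.length_filter_lt_length_iff_exists.2 ⟨a, by simp, by simp⟩

-- mySort: the hand-written quicksort (descending), recursing on bigger and smaller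
def pvMySort (lis : List Int) : List Int :=
  if lis.length ≤ 1 then lis
  else
    let base := lis.headI        -- lis[0]; lis is nonempty in this branch
    let p := pvPart base lis
    pvMySort p.1 ++ p.2.2 ++ pvMySort p.2.1
termination_by lis.length
decreasing_by
  · exact pvPart_fst_lt lis (by intro hnil; simp [hnil] at *)
  · exact pvPart_snd_lt lis (by intro hnil; simp [hnil] at *)

-- int(x) for a string that is str() of an int: ofChars? never returns none there
def pvParse (s : List Char) : Int := (PySem.Int.ofChars? s).getD 0

def strSort (lis : List Int) : String :=
  -- lis = [str(x) for x in lis]   (strings kept as List Char)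
  let lisS : List (List Char) := lis.map PySem.Int.toChars
  -- maxNum loop
  let maxNum : Int := lisS.foldl (fun m l => if m < (l.length : Int) then (l.length : Int) else m) 0
  -- ketaNumList: for each i in range(maxNum) append [] and fill it with the strings of length i+1
  let keta : List (List (List Char)) :=
    (PySem.List.pyRange 0 maxNum 1).foldl
      (fun acc i =>
        acc ++ [lisS.foldl (fun b l => if ((l.length : Int) == i + 1) then b ++ [l] else b) []]) []
  -- the index loop rewriting ketaNumList[i] in place = a map over the list; a rewritten
  -- bucket holds ints (Sum.inr), an untouched one still holds strings (Sum.inl)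
  let keta2 : List (List (List Char) ⊕ List Int) :=
    keta.map (fun b =>
      if 2 ≤ b.length then Sum.inr (pvMySort (b.map pvParse)) else Sum.inl b)
  -- result loop: result += str(num)
  let result : List Char :=
    keta2.foldl (fun r kn =>
      match kn with
      | Sum.inl ss => ss.foldl (fun r s => r ++ s) r
      | Sum.inr ns => ns.foldl (fun r n => r ++ PySem.Int.toChars n) r) []
  String.ofList result

-- ===== PORT B =====
-- int(s) for a string produced by str() of an int (B's own copy)
def pvParseB (s : List Char) : Int := (PySem.Int.ofChars? s).getD 0

def strSort_alt (lis : List Int) : String :=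
  -- one pass: buckets.setdefault(len(s), []).append(s)
  let buckets : PySem.Dict Int (List (List Char)) :=
    lis.foldl (fun d x => d.modify ((PySem.Int.toChars x).length : Int) [] (· ++ [PySem.Int.toChars x]))
      PySem.Dict.empty
  -- for k in sorted(buckets): …
  let out : List (List Char) :=
    (PySem.List.sorted buckets.keys (fun k => k) false).foldl
      (fun out k =>
        let group := buckets.getD k []
        let group :=
          if 1 < group.length then
            (PySem.List.sorted (group.map pvParseB) (fun n => n) true).map PySem.Int.toChars
          else group
        out ++ group) []
  String.ofList (PySem.Chars.join [] out)

-- ===== PRECONDITION & SPEC =====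
def Spec_strSort (lis : List Int) (out : String) : Prop := out = strSort_alt lis
instance (lis : List Int) (out : String) : Decidable (Spec_strSort lis out) := by unfold Spec_strSort; infer_instance

-- ===== CLAIM (what is proved, stated in full; the proofs are below) =====
def Claim_equal_strSort : Prop := ∀ (lis : List Int), Dom_strSort lis → Spec_strSort lis (strSort lis)

-- ===== LEMMAS AND PROOFS =====

-- abbreviations used by the proofs only
def pvLenI (s : List Char) : Int := (s.length : Int)

def pvBucket (lis : List Int) (k : Int) : List (List Char) :=
  (lis.map PySem.Int.toChars).filter (fun s => pvLenI s == k)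

def pvGroup (lis : List Int) (k : Int) : List (List Char) :=
  if 1 < (pvBucket lis k).length then
    (PySem.List.sorted ((pvBucket lis k).map pvParse) (fun n => n) true).map PySem.Int.toChars
  else pvBucket lis k

def pvMaxNum (lis : List Int) : Int :=
  ((lis.map PySem.Int.toChars).map pvLenI).foldl max 0

def pvKeys (lis : List Int) : List Int :=
  PySem.Set.ofList (lis.map (fun x => pvLenI (PySem.Int.toChars x)))

-- "".join with empty separator is flatten
theorem pvJoinNil (l : List (List Char)) : PySem.Chars.join [] l = l.flatten := by
  induction l with
  | nil => simp [PySem.Chars.join_nil]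
  | cons p rest ih =>
    cases rest with
    | nil => simp [PySem.Chars.join_singleton]
    | cons q rest' =>
      rw [PySem.Chars.join_cons_cons]
      simp only [List.flatten_cons] at ih ⊢
      rw [ih]
      simp

-- A's final accumulation loop flattens the rendered buckets
theorem pvStep (r : List Char) (kn : List (List Char) ⊕ List Int) :
    (match kn with
     | Sum.inl ss => ss.foldl (fun r s => r ++ s) r
     | Sum.inr ns => ns.foldl (fun r n => r ++ PySem.Int.toChars n) r)
    = r ++ (match kn with
     | Sum.inl ss => ss.flatten
     | Sum.inr ns => (ns.map PySem.Int.toChars).flatten) := by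
  cases kn with
  | inl ss => simp [PySem.List.foldl_append_eq_flatMap (fun s => s) ss r, List.flatMap_def]
  | inr ns => simp [PySem.List.foldl_append_eq_flatMap PySem.Int.toChars ns r, List.flatMap_def]

theorem pvFoldlSum (l : List (List (List Char) ⊕ List Int)) (r : List Char) :
    l.foldl (fun r kn =>
      match kn with
      | Sum.inl ss => ss.foldl (fun r s => r ++ s) r
      | Sum.inr ns => ns.foldl (fun r n => r ++ PySem.Int.toChars n) r) r
    = r ++ (l.map (fun kn =>
        match kn with
        | Sum.inl ss => ss.flatten
        | Sum.inr ns => (ns.map PySem.Int.toChars).flatten)).flatten := by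
  induction l generalizing r with
  | nil => simp
  | cons kn rest ih =>
    rw [List.foldl_cons]
    show List.foldl _ (match kn with
      | Sum.inl ss => ss.foldl (fun r s => r ++ s) r
      | Sum.inr ns => ns.foldl (fun r n => r ++ PySem.Int.toChars n) r) rest = _
    rw [pvStep, ih]
    simp [List.append_assoc]

theorem pvFlattenFlatMap (l : List Int) (F : Int → List (List Char)) :
    (l.flatMap F).flatten = (l.map (fun k => (F k).flatten)).flatten := by
  induction l with
  | nil => rfl
  | cons k rest ih => simp [List.flatMap_cons, List.flatten_append, ih]

-- buckets outside the filter contribute nothing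
theorem pvFlattenFilter (l : List Int) (p : Int → Bool) (F : Int → List Char)
    (h : ∀ k ∈ l, p k = false → F k = []) :
    ((l.filter p).map F).flatten = (l.map F).flatten := by
  induction l with
  | nil => rfl
  | cons k rest ih =>
    by_cases hk : p k = true
    · simp [List.filter_cons, hk]
      exact ih (fun a ha hpa => h a (List.mem_cons_of_mem _ ha) hpa)
    · have hk' : p k = false := by simpa using hk
      have : F k = [] := h k List.mem_cons_self hk'
      simp [hk', this]
      exact ih (fun a ha hpa => h a (List.mem_cons_of_mem _ ha) hpa)

-- ---- quicksort = built-in descending sort ----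

theorem pvCountFilter (a : Int) (p : Int → Bool) (l : List Int) :
    List.count a (l.filter p) = if p a = true then List.count a l else 0 := by
  by_cases h : p a = true
  · simp [h, List.count_filter h]
  · have hmem : a ∉ l.filter p := fun hm => h (List.mem_filter.1 hm).2
    simp [h, List.count_eq_zero.2 hmem]

theorem pvPart_append_perm (base : Int) (l : List Int) :
    ((l.filter (fun x => decide (base < x)) ++ l.filter (fun x => decide (¬ base < x ∧ ¬ x < base)))
      ++ l.filter (fun x => decide (x < base))).Perm l := by
  rw [List.perm_iff_count]
  intro a
  simp only [List.count_append, pvCountFilter, decide_eq_true_eq]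
  rcases lt_trichotomy base a with h | h | h
  · simp [h, not_lt_of_gt h]
  · subst h; simp
  · simp [h, not_lt_of_gt h]

theorem pvMySort_perm (l : List Int) : (pvMySort l).Perm l := by
  by_cases h : l.length ≤ 1
  · rw [pvMySort, if_pos h]
  · rw [pvMySort, if_neg h]
    have hne : l ≠ [] := by intro e; subst e; simp at h
    have ih1 := pvMySort_perm ((pvPart l.headI l).1)
    have ih2 := pvMySort_perm ((pvPart l.headI l).2.1)
    refine ((ih1.append (List.Perm.refl ((pvPart l.headI l).2.2))).append ih2).trans ?_
    rw [pvPart_eq]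
    exact pvPart_append_perm l.headI l
termination_by l.length
decreasing_by
  · exact pvPart_fst_lt l (by intro e; subst e; simp at h)
  · exact pvPart_snd_lt l (by intro e; subst e; simp at h)

theorem pvPairwiseOf (m : List Int) (c : Int) (h : ∀ x ∈ m, x = c) :
    m.Pairwise (fun a b => b ≤ a) := by
  induction m with
  | nil => exact List.Pairwise.nil
  | cons a t ih =>
    refine List.Pairwise.cons ?_ (ih fun x hx => h x (List.mem_cons_of_mem _ hx))
    intro b hb
    rw [h a List.mem_cons_self, h b (List.mem_cons_of_mem _ hb)]

theorem pvMySort_pairwise (l : List Int) :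
    (pvMySort l).Pairwise (fun a b => b ≤ a) := by
  by_cases h : l.length ≤ 1
  · rw [pvMySort, if_pos h]
    match l, h with
    | [], _ => exact List.Pairwise.nil
    | [a], _ => exact List.pairwise_singleton _ a
  · rw [pvMySort, if_neg h]
    have ih1 := pvMySort_pairwise ((pvPart l.headI l).1)
    have ih2 := pvMySort_pairwise ((pvPart l.headI l).2.1)
    have hm1 : ∀ x ∈ pvMySort ((pvPart l.headI l).1), l.headI < x := by
      intro x hx
      have := (pvMySort_perm _).mem_iff.1 hx
      rw [pvPart_eq] at this
      simpa using (List.mem_filter.1 this).2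
    have hm2 : ∀ x ∈ pvMySort ((pvPart l.headI l).2.1), x < l.headI := by
      intro x hx
      have := (pvMySort_perm _).mem_iff.1 hx
      rw [pvPart_eq] at this
      simpa using (List.mem_filter.1 this).2
    have hmE : ∀ x ∈ (pvPart l.headI l).2.2, x = l.headI := by
      intro x hx
      rw [pvPart_eq] at hx
      have := (List.mem_filter.1 hx).2
      simp only [decide_eq_true_eq] at this
      omega
    rw [List.pairwise_append, List.pairwise_append]
    refine ⟨⟨ih1, pvPairwiseOf _ l.headI hmE, ?_⟩, ih2, ?_⟩
    · intro a ha b hb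
      have h1 := hm1 a ha
      have h2 := hmE b hb
      omega
    · intro a ha b hb
      have h2 := hm2 b hb
      rcases List.mem_append.1 ha with ha1 | ha2
      · have := hm1 a ha1; omega
      · have := hmE a ha2; omega
termination_by l.length
decreasing_by
  · exact pvPart_fst_lt l (by intro e; subst e; simp at h)
  · exact pvPart_snd_lt l (by intro e; subst e; simp at h)

theorem pvDescUnique (xs ys : List Int) (hp : xs.Perm ys)
    (hx : xs.Pairwise (fun a b => b ≤ a)) (hy : ys.Pairwise (fun a b => b ≤ a)) :
    xs = ys :=
  List.eq_of_perm_of_sorted (fun _ _ _ _ h1 h2 => le_antisymm h2 h1) hx hy hp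

theorem pvMySort_eq_sorted (l : List Int) :
    pvMySort l = PySem.List.sorted l (fun n => n) true := by
  refine pvDescUnique _ _ ?_ (pvMySort_pairwise l) ?_
  · exact (pvMySort_perm l).trans (PySem.List.sorted_perm l (fun n => n) true).symm
  · simpa using PySem.List.sorted_pairwise_rev l (fun n => n)

-- ---- the two bucket collections agree ----

theorem pvMaxNum_eq (lis : List Int) :
    (lis.map PySem.Int.toChars).foldl
        (fun m l => if m < (l.length : Int) then (l.length : Int) else m) 0
      = pvMaxNum lis := by
  unfold pvMaxNum
  rw [List.foldl_map, List.foldl_map, List.foldl_map]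
  apply PySem.List.foldl_congr_mem
  intro acc x _
  simp only [pvLenI]
  rcases lt_trichotomy acc (((PySem.Int.toChars x).length : Int)) with h | h | h
  · rw [if_pos h, max_eq_right h.le]
  · rw [if_neg (by omega), h, max_self]
  · rw [if_neg (by omega), max_eq_left h.le]

theorem pvGetD_eq (lis : List Int) (k : Int) :
    (lis.foldl (fun d x => d.modify ((PySem.Int.toChars x).length : Int) []
        (· ++ [PySem.Int.toChars x])) PySem.Dict.empty).getD k []
      = pvBucket lis k := by
  have h : lis.foldl (fun d x => d.modify ((PySem.Int.toChars x).length : Int) []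
        (· ++ [PySem.Int.toChars x])) PySem.Dict.empty
      = (lis.map (fun x => (((PySem.Int.toChars x).length : Int), PySem.Int.toChars x))).foldl
          (fun d p => d.modify p.1 [] (· ++ [p.2])) PySem.Dict.empty := by
    rw [List.foldl_map]
  rw [h, PySem.Dict.getD_foldl_modify_append]
  unfold pvBucket
  simp [List.filter_map, List.map_map, pvLenI, Function.comp_def]

theorem pvKeys_eq (lis : List Int) :
    (lis.foldl (fun d x => d.modify ((PySem.Int.toChars x).length : Int) []
        (· ++ [PySem.Int.toChars x])) PySem.Dict.empty).keys
      = pvKeys lis := by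
  rw [PySem.Dict.keys_foldl_modify_key lis (fun x => ((PySem.Int.toChars x).length : Int)) []
      (fun _ x => (· ++ [PySem.Int.toChars x])) PySem.Dict.empty]
  rfl

theorem pvKeys_nodup (lis : List Int) : (pvKeys lis).Nodup := by
  unfold pvKeys; exact PySem.Set.nodup_ofList _

theorem pvMem_keys (lis : List Int) (k : Int) :
    k ∈ pvKeys lis ↔ ∃ x ∈ lis, pvLenI (PySem.Int.toChars x) = k := by
  unfold pvKeys
  rw [PySem.Set.mem_ofList]
  simp [eq_comm]

theorem pvLen_pos (x : Int) : 1 ≤ pvLenI (PySem.Int.toChars x) := by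
  unfold pvLenI PySem.Int.toChars
  split
  · simp
  · have := @Nat.length_toDigits_pos 10 x.toNat
    omega

theorem pvKeys_bounds (lis : List Int) (k : Int) (hk : k ∈ pvKeys lis) :
    1 ≤ k ∧ k ≤ pvMaxNum lis := by
  obtain ⟨x, hx, hlen⟩ := (pvMem_keys lis k).1 hk
  constructor
  · exact hlen ▸ pvLen_pos x
  · unfold pvMaxNum
    have hmem : pvLenI (PySem.Int.toChars x) ∈ (lis.map PySem.Int.toChars).map pvLenI := by
      simp only [List.map_map]
      exact List.mem_map.2 ⟨x, hx, rfl⟩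
    exact hlen ▸ (PySem.List.le_foldl_max _ 0).2 _ hmem

theorem pvBucket_empty (lis : List Int) (k : Int) (hk : k ∉ pvKeys lis) :
    pvBucket lis k = [] := by
  unfold pvBucket
  rw [List.filter_map]
  rw [List.filter_eq_nil_iff.2, List.map_nil]
  intro x hx
  simp only [Function.comp_apply, beq_iff_eq]
  intro he
  exact hk ((pvMem_keys lis k).2 ⟨x, hx, he⟩)

theorem pvSortedKeys_eq (lis : List Int) :
    PySem.List.sorted (pvKeys lis) (fun n => n) false
      = (PySem.List.pyRange 1 (pvMaxNum lis + 1) 1).filter (fun k => (pvKeys lis).contains k) := by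
  apply PySem.List.sorted_eq_of_perm_of_pairwise_lt
  · have hnd : ((PySem.List.pyRange 1 (pvMaxNum lis + 1) 1).filter
        (fun k => (pvKeys lis).contains k)).Nodup :=
      List.Pairwise.filter _ ((PySem.List.pairwise_lt_pyRange_one _ _).imp fun h => ne_of_lt h)
    rw [List.perm_ext_iff_of_nodup hnd (pvKeys_nodup lis)]
    intro a
    simp only [List.mem_filter, PySem.List.mem_pyRange_one, List.contains_iff_mem]
    constructor
    · exact fun h => h.2
    · intro h
      have hb := pvKeys_bounds lis a h
      exact ⟨⟨hb.1, by omega⟩, h⟩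
  · exact List.Pairwise.filter _ (PySem.List.pairwise_lt_pyRange_one _ _)

theorem pvGroup_nil (lis : List Int) (k : Int) (hk : k ∉ pvKeys lis) :
    pvGroup lis k = [] := by
  unfold pvGroup
  rw [pvBucket_empty lis k hk]
  simp

-- chain: A's walk over range(maxNum) equals B's walk over the sorted present keys
theorem pvChain (lis : List Int) :
    ((PySem.List.pyRange 0 (pvMaxNum lis) 1).map (fun i => (pvGroup lis (i + 1)).flatten)).flatten
      = ((PySem.List.sorted (pvKeys lis) (fun n => n) false).map
          (fun k => (pvGroup lis k).flatten)).flatten := by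
  rw [pvSortedKeys_eq]
  rw [pvFlattenFilter _ _ _ (fun k _ hfalse => by
    rw [pvGroup_nil lis k (by simpa [List.contains_iff_mem] using hfalse)]
    rfl)]
  rw [PySem.List.pyRange_one, PySem.List.pyRange_one]
  simp only [List.map_map]
  have h1 : (pvMaxNum lis + 1 - 1).toNat = (pvMaxNum lis - 0).toNat := by omega
  rw [h1]
  refine congrArg List.flatten (List.map_congr_left fun j _ => ?_)
  simp only [Function.comp_def]
  have h2 : (0 : Int) + (j : Int) + 1 = 1 + (j : Int) := by omega
  rw [h2]

-- the per-bucket renderings of A and B agree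
theorem pvPointA (b : List (List Char)) :
    (match (if 2 ≤ b.length then Sum.inr (pvMySort (b.map pvParse))
            else Sum.inl b : List (List Char) ⊕ List Int) with
     | Sum.inl ss => ss.flatten
     | Sum.inr ns => (ns.map PySem.Int.toChars).flatten)
    = (if 1 < b.length then
        (PySem.List.sorted (b.map pvParse) (fun n => n) true).map PySem.Int.toChars
       else b).flatten := by
  by_cases h : 2 ≤ b.length
  · rw [if_pos h, if_pos (by omega)]
    show ((pvMySort (b.map pvParse)).map PySem.Int.toChars).flatten = _
    rw [pvMySort_eq_sorted]
  · rw [if_neg h, if_neg (by omega)]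

-- the whole equivalence
theorem pv_main (lis : List Int) : strSort lis = strSort_alt lis := by
  have hA : strSort lis = String.ofList
      (((PySem.List.pyRange 0 (pvMaxNum lis) 1).map
        (fun i => (pvGroup lis (i + 1)).flatten)).flatten) := by
    simp only [strSort]
    rw [pvMaxNum_eq]
    rw [PySem.List.foldl_append_singleton_eq_map, List.nil_append]
    simp only [PySem.List.foldl_append_if, List.nil_append, List.map_id']
    rw [List.map_map, pvFoldlSum, List.nil_append, List.map_map]
    refine congrArg String.ofList (congrArg List.flatten (List.map_congr_left fun i _ => ?_))
    simp only [Function.comp_def]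
    exact pvPointA _
  have hB : strSort_alt lis = String.ofList
      (((PySem.List.sorted (pvKeys lis) (fun n => n) false).map
        (fun k => (pvGroup lis k).flatten)).flatten) := by
    simp only [strSort_alt]
    rw [pvKeys_eq]
    simp only [pvGetD_eq]
    rw [PySem.List.foldl_append_eq_flatMap, List.nil_append, pvJoinNil, pvFlattenFlatMap]
    rfl
  rw [hA, hB, pvChain]

-- ===== VERDICT (by name: the statement is the Claim_ definition above) =====
theorem strSort_spec : Claim_equal_strSort := by
  intro lis _
  unfold Spec_strSort
  exact pv_main lis
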